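-- pv_equiv track=rewrite | github.com/JiaruiWang-Jill/BurnWoundAreaAnalysis | homographyTest/HTest2.py | getRealCoordinateList
-- ===== SOURCE A (Python) =====
-- def getRealCoordinateList(times):
-- 	patternPoints = []
-- 	t = 1
-- 	for i in range(times):
-- 		for i in range(0,10):
-- 			patternPoints.append([0, t*(25+10*i), 0])
--
-- 		for i in range(0,10):
-- 			patternPoints.append([t*10, t*(25+10*i), 0])
--
-- 		for i in range(0,10):
-- 			patternPoints.append([t*(15+10*i), t*10, 0])
--
-- 		for i in range(0,10):
-- 			patternPoints.append([t*(15+10*i), 0, 0])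
--
-- 	return patternPoints
-- ===== SOURCE B (Python) =====
-- def getRealCoordinateList(times):
--     # Closed form: point k of the output is determined arithmetically from
--     # its index.  k % 40 picks the position inside the repeating 40-point
--     # pattern; divmod(.,10) splits it into an edge number q and offset i.
--     def point(k):
--         q, i = divmod(k % 40, 10)
--         if q == 0:
--             return [0, 25 + 10 * i, 0]
--         if q == 1:
--             return [10, 25 + 10 * i, 0]
--         if q == 2:
--             return [15 + 10 * i, 10, 0]
--         return [15 + 10 * i, 0, 0]
--     return [point(k) for k in range(40 * times)]
-- ===== Notes on version B (the rewrite author's own statement) =====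
-- stated objective: alternative
-- what changed: B replaces A's nested loops and accumulator with a closed-form indexing scheme: a single comprehension over range(40*times) computes point k directly from divmod(k % 40, 10), so no intermediate block is built or appended.
import Mathlib
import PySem

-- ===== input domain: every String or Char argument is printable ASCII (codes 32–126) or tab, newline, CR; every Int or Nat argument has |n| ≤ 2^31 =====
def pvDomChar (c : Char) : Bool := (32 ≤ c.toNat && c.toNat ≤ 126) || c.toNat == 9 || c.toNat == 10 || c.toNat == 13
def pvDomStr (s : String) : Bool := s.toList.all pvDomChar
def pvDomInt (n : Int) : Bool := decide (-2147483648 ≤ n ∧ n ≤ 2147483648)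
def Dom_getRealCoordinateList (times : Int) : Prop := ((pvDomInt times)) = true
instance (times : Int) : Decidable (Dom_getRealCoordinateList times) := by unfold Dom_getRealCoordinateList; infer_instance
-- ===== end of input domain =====

-- B computes each output point directly from its index k via divmod(k % 40, 10) in one
-- comprehension over range(40*times), instead of A's nested append loops (alternative algorithm).


-- ===== PORT A =====
-- literal transliteration of A: t = 1, outer loop over range(times), four inner append loops
def getRealCoordinateList (times : Int) : List (List Int) :=
  let t : Int := 1
  (PySem.List.pyRange 0 times 1).foldl (fun patternPoints _ =>
    let patternPoints :=
      (PySem.List.pyRange 0 10 1).foldl (fun acc i => acc ++ [[0, t * (25 + 10 * i), 0]]) patternPoints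
    let patternPoints :=
      (PySem.List.pyRange 0 10 1).foldl (fun acc i => acc ++ [[t * 10, t * (25 + 10 * i), 0]]) patternPoints
    let patternPoints :=
      (PySem.List.pyRange 0 10 1).foldl (fun acc i => acc ++ [[t * (15 + 10 * i), t * 10, 0]]) patternPoints
    let patternPoints :=
      (PySem.List.pyRange 0 10 1).foldl (fun acc i => acc ++ [[t * (15 + 10 * i), 0, 0]]) patternPoints
    patternPoints) []

-- ===== PORT B =====
-- point k, computed from divmod(k % 40, 10) exactly as Source B's helper does
def pvPoint_getRealCoordinateList (k : Int) : List Int :=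
  let r := PySem.Int.mod k 40
  let q := PySem.Int.floordiv r 10
  let i := PySem.Int.mod r 10
  if q = 0 then [0, 25 + 10 * i, 0]
  else if q = 1 then [10, 25 + 10 * i, 0]
  else if q = 2 then [15 + 10 * i, 10, 0]
  else [15 + 10 * i, 0, 0]

def getRealCoordinateList_alt (times : Int) : List (List Int) :=
  (PySem.List.pyRange 0 (40 * times) 1).map pvPoint_getRealCoordinateList

-- ===== PRECONDITION & SPEC =====
def Spec_getRealCoordinateList (times : Int) (out : List (List Int)) : Prop := out = getRealCoordinateList_alt times
instance (times : Int) (out : List (List Int)) : Decidable (Spec_getRealCoordinateList times out) := by unfold Spec_getRealCoordinateList; infer_instance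

-- ===== CLAIM =====
def Claim_equal_getRealCoordinateList : Prop := ∀ (times : Int), Dom_getRealCoordinateList times → Spec_getRealCoordinateList times (getRealCoordinateList times)

-- ===== LEMMAS AND PROOFS =====

-- the 40-point pattern both programs repeat (proof-only helper)
def pvBlock : List (List Int) :=
  (List.range 10).map (fun i => [0, 25 + 10 * (i : Int), 0])
  ++ (List.range 10).map (fun i => [10, 25 + 10 * (i : Int), 0])
  ++ (List.range 10).map (fun i => [15 + 10 * (i : Int), 10, 0])
  ++ (List.range 10).map (fun i => [15 + 10 * (i : Int), 0, 0])

-- one outer iteration of A appends exactly the fixed block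
theorem pvStepA (acc : List (List Int)) :
    ((fun patternPoints (_ : Int) =>
      let patternPoints :=
        (PySem.List.pyRange 0 10 1).foldl (fun a i => a ++ [[0, (1:Int) * (25 + 10 * i), 0]]) patternPoints
      let patternPoints :=
        (PySem.List.pyRange 0 10 1).foldl (fun a i => a ++ [[(1:Int) * 10, 1 * (25 + 10 * i), 0]]) patternPoints
      let patternPoints :=
        (PySem.List.pyRange 0 10 1).foldl (fun a i => a ++ [[(1:Int) * (15 + 10 * i), 1 * 10, 0]]) patternPoints
      let patternPoints :=
        (PySem.List.pyRange 0 10 1).foldl (fun a i => a ++ [[(1:Int) * (15 + 10 * i), 0, 0]]) patternPoints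
      patternPoints) acc 0)
    = acc ++ pvBlock := by
  simp [pvBlock, ← List.flatMap_def]; decide

theorem pvFoldA (l : List Int) (acc : List (List Int)) :
    (l.foldl (fun patternPoints (_ : Int) =>
      let patternPoints :=
        (PySem.List.pyRange 0 10 1).foldl (fun a i => a ++ [[0, (1:Int) * (25 + 10 * i), 0]]) patternPoints
      let patternPoints :=
        (PySem.List.pyRange 0 10 1).foldl (fun a i => a ++ [[(1:Int) * 10, 1 * (25 + 10 * i), 0]]) patternPoints
      let patternPoints :=
        (PySem.List.pyRange 0 10 1).foldl (fun a i => a ++ [[(1:Int) * (15 + 10 * i), 1 * 10, 0]]) patternPoints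
      let patternPoints :=
        (PySem.List.pyRange 0 10 1).foldl (fun a i => a ++ [[(1:Int) * (15 + 10 * i), 0, 0]]) patternPoints
      patternPoints) acc)
    = acc ++ l.flatMap (fun _ => pvBlock) := by
  induction l generalizing acc with
  | nil => simp
  | cons x xs ih =>
      simp only [List.foldl_cons, List.flatMap_cons]
      have h := pvStepA acc
      simp only at h
      rw [show ((PySem.List.pyRange 0 10 1).foldl (fun a i => a ++ [[(1:Int) * (15 + 10 * i), 0, 0]])
            ((PySem.List.pyRange 0 10 1).foldl (fun a i => a ++ [[(1:Int) * (15 + 10 * i), 1 * 10, 0]])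
              ((PySem.List.pyRange 0 10 1).foldl (fun a i => a ++ [[(1:Int) * 10, 1 * (25 + 10 * i), 0]])
                ((PySem.List.pyRange 0 10 1).foldl (fun a i => a ++ [[0, (1:Int) * (25 + 10 * i), 0]]) acc))))
            = acc ++ pvBlock from h, ih, List.append_assoc]

-- the point function is 40-periodic
theorem pvPointPeriod (n : Int) (k : Nat) :
    pvPoint_getRealCoordinateList (40 * n + k) = pvPoint_getRealCoordinateList (k : Int) := by
  unfold pvPoint_getRealCoordinateList
  have h : PySem.Int.mod (40 * n + k) 40 = PySem.Int.mod (k : Int) 40 := by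
    simp only [PySem.Int.mod_eq_emod_of_pos (show (0:Int) < 40 by norm_num)]
    omega
  rw [h]

-- one 40-index slice of B's range maps to exactly the block
theorem pvSliceB (n : Nat) :
    (PySem.List.pyRange (40 * (n : Int)) (40 * (n : Int) + 40) 1).map pvPoint_getRealCoordinateList
      = pvBlock := by
  rw [PySem.List.pyRange_one]
  have h40 : ((40 * (n : Int) + 40 - 40 * (n : Int)).toNat) = 40 := by omega
  rw [h40, List.map_map]
  have : ∀ k ∈ List.range 40,
      (pvPoint_getRealCoordinateList ∘ fun k : Nat => 40 * (n : Int) + k) k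
        = pvPoint_getRealCoordinateList (k : Int) := by
    intro k _
    exact pvPointPeriod n k
  rw [List.map_congr_left this]
  decide

-- B on a nonnegative count equals `n` copies of the block
theorem pvBn (n : Nat) :
    getRealCoordinateList_alt (n : Int) = (List.range n).flatMap (fun _ => pvBlock) := by
  induction n with
  | zero => simp [getRealCoordinateList_alt, PySem.List.pyRange_one_eq_nil]
  | succ m ih =>
      unfold getRealCoordinateList_alt at *
      have hsplit : PySem.List.pyRange 0 (40 * ((m + 1 : Nat) : Int)) 1
          = PySem.List.pyRange 0 (40 * (m : Int)) 1
            ++ PySem.List.pyRange (40 * (m : Int)) (40 * (m : Int) + 40) 1 := by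
        have : (40 * ((m + 1 : Nat) : Int)) = 40 * (m : Int) + 40 := by push_cast; ring
        rw [this]
        exact PySem.List.pyRange_one_append 0 (40 * (m : Int)) (40 * (m : Int) + 40)
          (by positivity) (by omega)
      rw [hsplit, List.map_append, ih, pvSliceB, List.range_succ, List.flatMap_append]
      simp

-- ===== VERDICT =====
theorem getRealCoordinateList_spec : Claim_equal_getRealCoordinateList := by
  intro times _
  unfold Spec_getRealCoordinateList
  by_cases h : times ≤ 0
  · unfold getRealCoordinateList getRealCoordinateList_alt
    rw [PySem.List.pyRange_one_eq_nil h,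
       PySem.List.pyRange_one_eq_nil (show (40:Int) * times ≤ 0 by omega)]
    simp
  · obtain ⟨n, hn⟩ : ∃ n : Nat, times = (n : Int) := ⟨times.toNat, by omega⟩
    subst hn
    rw [pvBn]
    unfold getRealCoordinateList
    simp only []
    rw [PySem.List.pyRange_zero_natCast]
    rw [pvFoldA]
    simp [List.flatMap_map]
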